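-- pv_equiv track=rewrite | github.com/MakosScott/Python-Assignments | Assignments/Assignment 3/A3_part2_300194574.py | casual_number
-- ===== SOURCE A (Python) =====
-- def casual_number(s):
--     '''
--     (str) --> int
--     Preconditions: Must input a string
--     Function that takes the string s and returns an int representing the monetary value of the numbers in that string
--     '''
--     x = ""
--     if "-" in s :
--        neg = -1
--     else :
--         neg = 1
--     ###
--     if s.count('-')> 1 :
--         return None
--     ###
--     for char in s :
--          if char in "abcdefghijklmnopqrstuvwxyzx" :
--             return None
--          elif char =="," :
--             x= x+char.replace(",","")
--          elif char in "1234567890" :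
--             x = x+char
--     ###
--     if x == "" :
--         return None
--     else :
--         return (neg *int(x))
-- ===== SOURCE B (Python) =====
-- def casual_number(s):
--     '''
--     (str) --> int
--     Set-algebra reimplementation: validation and digit extraction are done with
--     set operations on the distinct characters of s and a translate deletion
--     table, instead of a character-classifying loop.
--     '''
--     chars = set(s)
--     if chars & set("abcdefghijklmnopqrstuvwxyz"):
--         return None
--     if s.count('-') > 1:
--         return None
--     digits = s.translate(dict.fromkeys(map(ord, chars - set("0123456789"))))
--     if not digits:
--         return None
--     return -int(digits) if '-' in chars else int(digits)
-- ===== Notes on version B (the rewrite author's own statement) =====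
-- stated objective: alternative
-- what changed: Replaces A's single character-classifying loop with a string accumulator by set algebra over the distinct characters of s: set(s) intersected with the lowercase alphabet for validation, a set difference turned into a str.translate deletion table for digit extraction, and one final int() with the sign read off set membership.
import Mathlib
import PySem

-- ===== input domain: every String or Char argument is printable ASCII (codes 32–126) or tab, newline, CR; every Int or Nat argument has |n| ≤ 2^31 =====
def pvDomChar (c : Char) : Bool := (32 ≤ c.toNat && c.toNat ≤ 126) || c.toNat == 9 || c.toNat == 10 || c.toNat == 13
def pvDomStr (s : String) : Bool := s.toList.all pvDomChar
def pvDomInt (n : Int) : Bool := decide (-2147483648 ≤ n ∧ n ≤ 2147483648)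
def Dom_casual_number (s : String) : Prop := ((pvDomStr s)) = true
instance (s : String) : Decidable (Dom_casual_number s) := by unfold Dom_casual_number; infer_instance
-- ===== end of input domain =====

-- B replaces A's single classifying loop by set algebra over the distinct characters
-- (lowercase intersection for validation, a set-difference deletion table for digit
-- extraction); same values on every input, same asymptotic cost.

-- ===== PORT A =====
-- the for-loop of A: state is the accumulated digit string x; after the loop, A's final if/return
def casualLoopA (neg : Int) (x : List Char) (cs : List Char) : Option Int :=
  match cs with
  | [] => if x = [] then none else (PySem.Int.ofChars? x).map (fun v => neg * v)
  | c :: rest =>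
    if ("abcdefghijklmnopqrstuvwxyzx".toList).contains c then none
    else if c = ',' then casualLoopA neg x rest   -- x = x + char.replace(",","") = x
    else if ("1234567890".toList).contains c then casualLoopA neg (x ++ [c]) rest
    else casualLoopA neg x rest

def casual_number (s : String) : Option Int :=
  let neg : Int := if s.toList.contains '-' then -1 else 1
  if PySem.Str.count s "-" > 1 then none
  else casualLoopA neg [] s.toList

-- ===== PORT B =====
def casual_number_alt (s : String) : Option Int :=
  let chars : PySem.Set Char := PySem.Set.ofList s.toList
  if PySem.Set.inter chars (PySem.Set.ofList "abcdefghijklmnopqrstuvwxyz".toList) ≠ [] then none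
  else if PySem.Str.count s "-" > 1 then none
  else
    let del := PySem.Set.diff chars (PySem.Set.ofList "0123456789".toList)
    -- s.translate(dict.fromkeys(map(ord, del))) deletes exactly the characters of del (exact port)
    let digits := s.toList.filter (fun c => !(PySem.Set.contains del c))
    if digits = [] then none
    else if PySem.Set.contains chars '-' then (PySem.Int.ofChars? digits).map (fun v => -v)
    else PySem.Int.ofChars? digits

-- ===== PRECONDITION & SPEC =====
def Spec_casual_number (s : String) (out : Option Int) : Prop := out = casual_number_alt s
instance (s : String) (out : Option Int) : Decidable (Spec_casual_number s out) := by unfold Spec_casual_number; infer_instance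

-- ===== CLAIM (what is proved, stated in full; the proofs are below) =====
def Claim_equal_casual_number : Prop := ∀ (s : String), Dom_casual_number s → Spec_casual_number s (casual_number s)

-- ===== LEMMAS AND PROOFS =====

lemma lower_contains_eq (c : Char) :
    ("abcdefghijklmnopqrstuvwxyzx".toList).contains c
      = ("abcdefghijklmnopqrstuvwxyz".toList).contains c := by
  have h1 : "abcdefghijklmnopqrstuvwxyzx".toList
      = "abcdefghijklmnopqrstuvwxyz".toList ++ ['x'] := by decide
  rw [h1]
  cases hx : c == 'x' with
  | true =>
    have : c = 'x' := by exact eq_of_beq hx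
    subst this; decide
  | false =>
    rw [List.contains_append]
    simp only [List.contains_cons, List.contains_nil, hx, Bool.or_false]

lemma digit_contains_eq (c : Char) :
    ("1234567890".toList).contains c = ("0123456789".toList).contains c := by
  have hp : "1234567890".toList.Perm ("0123456789".toList) := by decide
  rw [Bool.eq_iff_iff]
  simp only [List.contains_iff_mem]
  exact hp.mem_iff

lemma comma_not_digit : ("0123456789".toList).contains ',' = false := by decide

-- characterization of A's loop: it returns none on a lowercase letter, otherwise
-- accumulates exactly the digit characters and converts them
lemma loopA_eq (neg : Int) (cs : List Char) : ∀ x : List Char,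
    casualLoopA neg x cs =
      if cs.any (fun c => ("abcdefghijklmnopqrstuvwxyz".toList).contains c) then none
      else
        let digits := x ++ cs.filter (fun c => ("0123456789".toList).contains c)
        if digits = [] then none
        else (PySem.Int.ofChars? digits).map (fun v => neg * v) := by
  induction cs with
  | nil => intro x; simp [casualLoopA]
  | cons c rest ih =>
    intro x
    rw [casualLoopA, lower_contains_eq c]
    simp only [List.any_cons, List.filter_cons]
    by_cases hl : ("abcdefghijklmnopqrstuvwxyz".toList).contains c = true
    · simp only [hl, Bool.true_or, if_true]
    · rw [Bool.not_eq_true] at hl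
      simp only [hl, Bool.false_or]
      by_cases hc : c = ','
      · subst hc
        rw [if_pos rfl, ih x, comma_not_digit]
        simp only [Bool.false_eq_true, if_false]
      · rw [if_neg hc, digit_contains_eq c]
        by_cases hd : ("0123456789".toList).contains c = true
        · rw [if_pos hd, if_pos hd, ih (x ++ [c])]
          simp only [List.append_assoc, List.singleton_append, Bool.false_eq_true, if_false]
        · rw [Bool.not_eq_true] at hd
          simp only [hd, Bool.false_eq_true, if_false, ih x]

-- the lowercase-intersection test of B is A's "any lowercase character" test
lemma inter_ne_nil_iff (l L : List Char) :
    (PySem.Set.inter (PySem.Set.ofList l) (PySem.Set.ofList L) ≠ []) ↔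
      l.any (fun c => L.contains c) = true := by
  rw [← List.isEmpty_eq_false_iff, List.isEmpty_eq_false_iff_exists_mem]
  simp only [List.any_eq_true, List.contains_iff_mem]
  constructor
  · rintro ⟨y, hy⟩
    rw [PySem.Set.mem_inter] at hy
    exact ⟨y, (PySem.Set.mem_ofList _ _).mp hy.1, (PySem.Set.mem_ofList _ _).mp hy.2⟩
  · rintro ⟨y, h1, h2⟩
    exact ⟨y, (PySem.Set.mem_inter _ _ _).mpr
      ⟨(PySem.Set.mem_ofList _ _).mpr h1, (PySem.Set.mem_ofList _ _).mpr h2⟩⟩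

-- the deletion-table filter of B keeps exactly the digit characters
lemma filter_del_eq (l : List Char) :
    l.filter (fun c =>
        !(PySem.Set.contains
            (PySem.Set.diff (PySem.Set.ofList l) (PySem.Set.ofList "0123456789".toList)) c))
      = l.filter (fun c => ("0123456789".toList).contains c) := by
  apply List.filter_congr
  intro c hc
  by_cases hd : c ∈ "0123456789".toList
  · have h1 : PySem.Set.contains
        (PySem.Set.diff (PySem.Set.ofList l) (PySem.Set.ofList "0123456789".toList)) c = false := by
      rw [← Bool.not_eq_true]
      intro hcontra
      exact ((PySem.Set.mem_diff _ _ _).mp ((PySem.Set.contains_iff _ _).mp hcontra)).2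
        ((PySem.Set.mem_ofList _ _).mpr hd)
    rw [h1]
    have h2 : ("0123456789".toList).contains c = true := by
      rw [List.contains_iff_mem]; exact hd
    rw [h2]
    rfl
  · have h1 : PySem.Set.contains
        (PySem.Set.diff (PySem.Set.ofList l) (PySem.Set.ofList "0123456789".toList)) c = true :=
      (PySem.Set.contains_iff _ _).mpr ((PySem.Set.mem_diff _ _ _).mpr
        ⟨(PySem.Set.mem_ofList _ _).mpr hc, fun h => hd ((PySem.Set.mem_ofList _ _).mp h)⟩)
    rw [h1]
    have h2 : ("0123456789".toList).contains c = false := by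
      rw [← Bool.not_eq_true, List.contains_iff_mem]; exact hd
    rw [h2]
    rfl

lemma minus_mem_iff (l : List Char) :
    PySem.Set.contains (PySem.Set.ofList l) '-' = l.contains '-' := by
  rw [Bool.eq_iff_iff, PySem.Set.contains_iff, PySem.Set.mem_ofList, List.contains_iff_mem]

-- ===== VERDICT (by name: the statement is the Claim_ definition above) =====
theorem casual_number_spec : Claim_equal_casual_number := by
  intro s _
  unfold Spec_casual_number casual_number casual_number_alt
  simp only []
  by_cases hlet : PySem.Set.inter (PySem.Set.ofList s.toList)
      (PySem.Set.ofList "abcdefghijklmnopqrstuvwxyz".toList) ≠ []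
  · -- a lowercase letter occurs: both sides return none
    rw [if_pos hlet]
    have hany := (inter_ne_nil_iff _ _).mp hlet
    by_cases hcnt : PySem.Str.count s "-" > 1
    · rw [if_pos hcnt]
    · rw [if_neg hcnt, loopA_eq, if_pos hany]
  · rw [if_neg hlet]
    by_cases hcnt : PySem.Str.count s "-" > 1
    · rw [if_pos hcnt, if_pos hcnt]
    · rw [if_neg hcnt, if_neg hcnt, loopA_eq]
      have hany : s.toList.any (fun c => ("abcdefghijklmnopqrstuvwxyz".toList).contains c) = false := by
        rw [← Bool.not_eq_true]
        intro h
        exact hlet ((inter_ne_nil_iff _ _).mpr h)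
      rw [hany]
      simp only [Bool.false_eq_true, if_false, List.nil_append, filter_del_eq, minus_mem_iff]
      by_cases hnil : s.toList.filter (fun c => ("0123456789".toList).contains c) = []
      · rw [if_pos hnil, if_pos hnil]
      · rw [if_neg hnil, if_neg hnil]
        by_cases hm : s.toList.contains '-' = true
        · rw [if_pos hm, if_pos hm]
          have hf : (fun v : Int => (-1 : Int) * v) = (fun v : Int => -v) := by
            funext v; ring
          rw [hf]
        · rw [Bool.not_eq_true] at hm
          rw [hm]
          simp only [Bool.false_eq_true, if_false]
          have hf : (fun v : Int => (1 : Int) * v) = id := by funext v; simp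
          rw [hf, Option.map_id]
          rfl
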